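-- pv_equiv track=rewrite | github.com/sofuncheung/csld | csld_20180609.py | these_atom_in_clus
-- ===== SOURCE A (Python) =====
-- import copy
--
-- def these_atom_in_clus(atoms_list, index):
--     index_copy = copy.deepcopy(index)
--     for i in atoms_list:
--         try:
--             index_copy.remove(i)
--         except ValueError:
--             return False
--     return True
-- ===== SOURCE B (Python) =====
-- def these_atom_in_clus(atoms_list, index):
--     ca = {}
--     for x in atoms_list:
--         ca[x] = ca.get(x, 0) + 1
--     ci = {}
--     for x in index:
--         ci[x] = ci.get(x, 0) + 1
--     return all(v <= ci.get(k, 0) for k, v in ca.items())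
-- ===== Notes on version B (the rewrite author's own statement) =====
-- stated objective: simpler
-- what changed: Replaces A's element-by-element list.remove loop with two frequency dictionaries built in one pass each, compared wholesale as a multiset-subset test.
import Mathlib
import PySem

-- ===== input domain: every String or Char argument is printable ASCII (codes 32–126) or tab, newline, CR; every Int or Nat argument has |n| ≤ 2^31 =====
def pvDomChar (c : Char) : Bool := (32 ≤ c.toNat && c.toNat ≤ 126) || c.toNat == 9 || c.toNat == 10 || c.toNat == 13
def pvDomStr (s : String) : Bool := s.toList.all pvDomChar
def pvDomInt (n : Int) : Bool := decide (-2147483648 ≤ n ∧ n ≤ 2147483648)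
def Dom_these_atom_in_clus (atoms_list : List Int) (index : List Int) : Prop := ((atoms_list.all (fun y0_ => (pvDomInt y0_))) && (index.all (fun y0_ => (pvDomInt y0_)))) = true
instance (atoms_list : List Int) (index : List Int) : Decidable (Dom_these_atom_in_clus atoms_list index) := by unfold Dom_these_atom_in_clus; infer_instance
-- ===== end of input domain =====

-- B replaces A's element-by-element list.remove loop with two frequency tables
-- compared wholesale (multiset-subset test); objective: simpler.

-- ===== PORT A =====
-- the for-loop of A: remove each atom from the remaining copy of index, False on ValueError
def theseGoA : List Int → List Int → Bool
  | [], _ => true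
  | i :: rest, idxCopy =>
    match PySem.List.remove? idxCopy i with
    | none => false                       -- except ValueError: return False
    | some idx' => theseGoA rest idx'

def these_atom_in_clus (atoms_list : List Int) (index : List Int) : Bool :=
  theseGoA atoms_list index               -- index_copy = copy.deepcopy(index)

-- ===== PORT B =====
def these_atom_in_clus_alt (atoms_list : List Int) (index : List Int) : Bool :=
  let ca := atoms_list.foldl (fun d x => d.insert x (d.getD x 0 + 1)) (PySem.Dict.empty : PySem.Dict Int Int)
  let ci := index.foldl (fun d x => d.insert x (d.getD x 0 + 1)) (PySem.Dict.empty : PySem.Dict Int Int)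
  ca.items.all (fun kv => kv.2 ≤ ci.getD kv.1 0)

-- ===== PRECONDITION & SPEC =====
def Spec_these_atom_in_clus (atoms_list : List Int) (index : List Int) (out : Bool) : Prop := out = these_atom_in_clus_alt atoms_list index
instance (atoms_list : List Int) (index : List Int) (out : Bool) : Decidable (Spec_these_atom_in_clus atoms_list index out) := by unfold Spec_these_atom_in_clus; infer_instance

-- ===== CLAIM (what is proved, stated in full; the proofs are below) =====
def Claim_equal_these_atom_in_clus : Prop := ∀ (atoms_list : List Int) (index : List Int), Dom_these_atom_in_clus atoms_list index → Spec_these_atom_in_clus atoms_list index (these_atom_in_clus atoms_list index)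

-- ===== LEMMAS AND PROOFS =====

-- A's loop succeeds exactly on multiset inclusion
theorem theseGoA_iff (l : List Int) : ∀ idx : List Int,
    theseGoA l idx = true ↔ ∀ k : Int, l.count k ≤ idx.count k := by
  induction l with
  | nil => intro idx; simp [theseGoA]
  | cons i rest ih =>
    intro idx
    by_cases hmem : i ∈ idx
    · have hrm := PySem.List.remove?_eq_some_erase idx i hmem
      have hc : 1 ≤ idx.count i := List.one_le_count_iff.mpr hmem
      simp only [theseGoA, hrm, ih]
      constructor
      · intro h k
        have hk2 := h k
        by_cases hk : k = i
        · subst hk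
          rw [List.count_erase_self] at hk2
          simp only [List.count_cons_self]
          omega
        · rw [List.count_erase_of_ne hk] at hk2
          simp only [List.count_cons]
          simp [Ne.symm hk]
          omega
      · intro h k
        have hk2 := h k
        by_cases hk : k = i
        · subst hk
          rw [List.count_erase_self]
          simp only [List.count_cons_self] at hk2
          omega
        · rw [List.count_erase_of_ne hk]
          simp only [List.count_cons] at hk2
          simp [Ne.symm hk] at hk2
          omega
    · rw [show theseGoA (i :: rest) idx = false from by
        simp [theseGoA, (PySem.List.remove?_eq_none_iff idx i).mpr hmem]]
      simp only [Bool.false_eq_true, false_iff, not_forall, not_le]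
      refine ⟨i, ?_⟩
      rw [List.count_eq_zero_of_not_mem hmem]
      simp [List.count_cons_self]

-- B's table comparison is the same multiset inclusion
theorem alt_iff (a idx : List Int) :
    these_atom_in_clus_alt a idx = true ↔ ∀ k : Int, a.count k ≤ idx.count k := by
  have e : these_atom_in_clus_alt a idx =
      (PySem.Dict.counter a).items.all
        (fun kv => kv.2 ≤ (PySem.Dict.counter idx).getD kv.1 0) := by
    have h1 := PySem.Dict.foldl_insert_getD_add_one_eq_counter (κ := Int) a
    have h2 := PySem.Dict.foldl_insert_getD_add_one_eq_counter (κ := Int) idx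
    simp only [these_atom_in_clus_alt]
    rw [h1, h2]
  rw [e, PySem.Dict.items_counter]
  simp only [List.all_eq_true, List.forall_mem_map, PySem.Dict.getD_counter,
    decide_eq_true_eq, PySem.Set.mem_ofList]
  constructor
  · intro h k
    by_cases hk : k ∈ a
    · exact_mod_cast h k hk
    · simp [List.count_eq_zero_of_not_mem hk]
  · intro h k _
    exact_mod_cast h k

-- ===== VERDICT (by name: the statement is the Claim_ definition above) =====
theorem these_atom_in_clus_spec : Claim_equal_these_atom_in_clus := by
  intro a idx _
  unfold Spec_these_atom_in_clus
  rw [Bool.eq_iff_iff, these_atom_in_clus, theseGoA_iff, alt_iff]
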